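-- pv_equiv track=rewrite | github.com/RS-010806/EVOLVE-MEM | core/evaluation.py | check_paraphrase_match
-- ===== SOURCE A (Python) =====
-- def check_paraphrase_match(predicted: str, ground_truth: str) -> bool:
--     """Check if predicted answer is a paraphrase of ground truth."""
--     if not predicted or not ground_truth:
--         return False
--
--     # Common paraphrasing patterns
--     paraphrase_patterns = [
--         # Time-related paraphrases
--         ('yesterday', 'the day before today'),
--         ('today', 'this day'),
--         ('tomorrow', 'the day after today'),
--         ('last week', 'the week before'),
--         ('next week', 'the week after'),
--
--         # Emotion-related paraphrases
--         ('happy', 'glad', 'pleased', 'joyful'),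
--         ('sad', 'unhappy', 'disappointed'),
--         ('excited', 'thrilled', 'enthusiastic'),
--         ('worried', 'concerned', 'anxious'),
--
--         # Action-related paraphrases
--         ('went to', 'visited', 'attended'),
--         ('said', 'mentioned', 'stated', 'told'),
--         ('did', 'performed', 'accomplished'),
--         ('got', 'received', 'obtained'),
--
--         # Location-related paraphrases
--         ('at home', 'in the house'),
--         ('at work', 'in the office'),
--         ('at school', 'in class'),
--
--         # Family-related paraphrases
--         ('son', 'child', 'boy'),
--         ('daughter', 'child', 'girl'),
--         ('husband', 'spouse', 'partner'),
--         ('wife', 'spouse', 'partner'),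
--     ]
--
--     pred_lower = predicted.lower()
--     truth_lower = ground_truth.lower()
--
--     # Check for direct paraphrase patterns
--     for pattern in paraphrase_patterns:
--         if isinstance(pattern, tuple):
--             # Handle synonym groups
--             if any(word in pred_lower for word in pattern) and any(word in truth_lower for word in pattern):
--                 return True
--         else:
--             # Handle single word replacements
--             if pattern in pred_lower and pattern in truth_lower:
--                 return True
--
--     return False
-- ===== SOURCE B (Python) =====
-- # Synonym groups flattened once into a list of same-group word pairs; matching is
-- # a single flat scan asking whether some pair (w1, w2) has w1 in the prediction
-- # and w2 in the ground truth.
-- _PARAPHRASE_GROUPS = [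
--     ('yesterday', 'the day before today'),
--     ('today', 'this day'),
--     ('tomorrow', 'the day after today'),
--     ('last week', 'the week before'),
--     ('next week', 'the week after'),
--     ('happy', 'glad', 'pleased', 'joyful'),
--     ('sad', 'unhappy', 'disappointed'),
--     ('excited', 'thrilled', 'enthusiastic'),
--     ('worried', 'concerned', 'anxious'),
--     ('went to', 'visited', 'attended'),
--     ('said', 'mentioned', 'stated', 'told'),
--     ('did', 'performed', 'accomplished'),
--     ('got', 'received', 'obtained'),
--     ('at home', 'in the house'),
--     ('at work', 'in the office'),
--     ('at school', 'in class'),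
--     ('son', 'child', 'boy'),
--     ('daughter', 'child', 'girl'),
--     ('husband', 'spouse', 'partner'),
--     ('wife', 'spouse', 'partner'),
-- ]
--
-- # all ordered same-group word pairs, computed once at import time
-- _SYNONYM_PAIRS = [(w1, w2) for group in _PARAPHRASE_GROUPS
--                   for w1 in group for w2 in group]
--
--
-- def check_paraphrase_match(predicted: str, ground_truth: str) -> bool:
--     """Check if predicted answer is a paraphrase of ground truth."""
--     if not predicted or not ground_truth:
--         return False
--     pred_lower = predicted.lower()
--     truth_lower = ground_truth.lower()
--     return any(w1 in pred_lower and w2 in truth_lower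
--                for w1, w2 in _SYNONYM_PAIRS)
-- ===== Notes on version B (the rewrite author's own statement) =====
-- stated objective: alternative
-- what changed: A's loop over synonym groups with a two-level any-in-pred AND any-in-truth test is replaced by flattening the groups once into a flat list of same-group word pairs and doing one flat scan asking whether some pair (w1,w2) has w1 in the prediction and w2 in the truth.
import Mathlib
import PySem

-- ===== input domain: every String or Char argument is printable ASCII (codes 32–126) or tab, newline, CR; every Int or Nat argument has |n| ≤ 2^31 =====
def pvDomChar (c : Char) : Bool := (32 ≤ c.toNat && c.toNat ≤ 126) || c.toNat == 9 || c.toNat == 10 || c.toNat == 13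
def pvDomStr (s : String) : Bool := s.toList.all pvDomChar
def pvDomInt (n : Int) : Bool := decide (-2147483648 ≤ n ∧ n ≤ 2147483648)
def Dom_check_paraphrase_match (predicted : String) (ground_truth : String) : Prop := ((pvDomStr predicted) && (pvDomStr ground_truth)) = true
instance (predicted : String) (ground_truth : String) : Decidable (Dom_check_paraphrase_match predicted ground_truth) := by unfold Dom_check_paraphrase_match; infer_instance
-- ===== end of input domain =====

-- B flattens the synonym groups once into a flat list of same-group word pairs and does a
-- single flat scan over the pairs, replacing A's two-level per-group scan (objective: alternative).


-- ===== PORT A =====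
-- the fixed synonym-group list (every entry of A's list is a tuple)
def pvPatterns : List (List String) :=
  [ ["yesterday", "the day before today"],
    ["today", "this day"],
    ["tomorrow", "the day after today"],
    ["last week", "the week before"],
    ["next week", "the week after"],
    ["happy", "glad", "pleased", "joyful"],
    ["sad", "unhappy", "disappointed"],
    ["excited", "thrilled", "enthusiastic"],
    ["worried", "concerned", "anxious"],
    ["went to", "visited", "attended"],
    ["said", "mentioned", "stated", "told"],
    ["did", "performed", "accomplished"],
    ["got", "received", "obtained"],
    ["at home", "in the house"],
    ["at work", "in the office"],
    ["at school", "in class"],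
    ["son", "child", "boy"],
    ["daughter", "child", "girl"],
    ["husband", "spouse", "partner"],
    ["wife", "spouse", "partner"] ]

-- A's for-loop with early return: first group hit by both sides wins
def pvALoop (pl tl : String) : List (List String) → Bool
  | [] => false
  | g :: rest =>
      if g.any (fun w => PySem.Str.isIn w pl) && g.any (fun w => PySem.Str.isIn w tl) then true
      else pvALoop pl tl rest

def check_paraphrase_match (predicted : String) (ground_truth : String) : Bool :=
  if PySem.Str.len predicted == 0 || PySem.Str.len ground_truth == 0 then false
  else pvALoop (PySem.Str.lower predicted) (PySem.Str.lower ground_truth) pvPatterns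

-- ===== PORT B =====
-- [(w1, w2) for group in groups for w1 in group for w2 in group]
def pvSynonymPairs : List (String × String) :=
  pvPatterns.flatMap (fun g => g.flatMap (fun w1 => g.map (fun w2 => (w1, w2))))

def check_paraphrase_match_alt (predicted : String) (ground_truth : String) : Bool :=
  if PySem.Str.len predicted == 0 || PySem.Str.len ground_truth == 0 then false
  else
    let pred_lower := PySem.Str.lower predicted
    let truth_lower := PySem.Str.lower ground_truth
    pvSynonymPairs.any (fun p => PySem.Str.isIn p.1 pred_lower && PySem.Str.isIn p.2 truth_lower)

-- ===== PRECONDITION & SPEC =====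
def Spec_check_paraphrase_match (predicted : String) (ground_truth : String) (out : Bool) : Prop := out = check_paraphrase_match_alt predicted ground_truth
instance (predicted : String) (ground_truth : String) (out : Bool) : Decidable (Spec_check_paraphrase_match predicted ground_truth out) := by unfold Spec_check_paraphrase_match; infer_instance

-- ===== CLAIM (what is proved, stated in full; the proofs are below) =====
def Claim_equal_check_paraphrase_match : Prop := ∀ (predicted : String) (ground_truth : String), Dom_check_paraphrase_match predicted ground_truth → Spec_check_paraphrase_match predicted ground_truth (check_paraphrase_match predicted ground_truth)

-- ===== LEMMAS AND PROOFS =====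

-- the flat pair scan over one group is that group's two-level test
theorem group_pairs_any (pl tl : String) (g : List String) :
    ((g.flatMap (fun w1 => g.map (fun w2 => (w1, w2)))).any
        (fun p => PySem.Str.isIn p.1 pl && PySem.Str.isIn p.2 tl))
      = (g.any (fun w => PySem.Str.isIn w pl) && g.any (fun w => PySem.Str.isIn w tl)) := by
  rw [Bool.eq_iff_iff, Bool.and_eq_true, List.any_eq_true, List.any_eq_true, List.any_eq_true]
  constructor
  · rintro ⟨p, hmem, hp⟩
    rw [List.mem_flatMap] at hmem
    obtain ⟨w1, hw1, hmap⟩ := hmem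
    rw [List.mem_map] at hmap
    obtain ⟨w2, hw2, rfl⟩ := hmap
    rw [Bool.and_eq_true] at hp
    exact ⟨⟨w1, hw1, hp.1⟩, ⟨w2, hw2, hp.2⟩⟩
  · rintro ⟨⟨w1, hw1, h1⟩, ⟨w2, hw2, h2⟩⟩
    refine ⟨(w1, w2), ?_, (Bool.and_eq_true _ _).mpr ⟨h1, h2⟩⟩
    rw [List.mem_flatMap]
    exact ⟨w1, hw1, List.mem_map.2 ⟨w2, hw2, rfl⟩⟩

-- the flat scan over the whole pair list equals A's early-return loop over the groups
theorem pairs_any_eq_loop (pl tl : String) :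
    ∀ l : List (List String),
      ((l.flatMap (fun g => g.flatMap (fun w1 => g.map (fun w2 => (w1, w2))))).any
          (fun p => PySem.Str.isIn p.1 pl && PySem.Str.isIn p.2 tl))
        = pvALoop pl tl l := by
  intro l
  induction l with
  | nil => simp [pvALoop]
  | cons g rest ih =>
      rw [List.flatMap_cons, List.any_append, group_pairs_any, ih]
      simp only [pvALoop]
      by_cases hc : (g.any (fun w => PySem.Str.isIn w pl) && g.any (fun w => PySem.Str.isIn w tl)) = true
      · rw [if_pos hc, hc, Bool.true_or]
      · rw [if_neg hc, Bool.eq_false_iff.2 hc, Bool.false_or]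

-- ===== VERDICT (by name: the statement is the Claim_ definition above) =====
theorem check_paraphrase_match_spec : Claim_equal_check_paraphrase_match := by
  intro predicted ground_truth _
  unfold Spec_check_paraphrase_match check_paraphrase_match check_paraphrase_match_alt
  by_cases h : (PySem.Str.len predicted == 0 || PySem.Str.len ground_truth == 0) = true
  · rw [if_pos h, if_pos h]
  · rw [if_neg h, if_neg h]
    exact (pairs_any_eq_loop _ _ pvPatterns).symm
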